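-- pv_equiv track=rewrite | github.com/EngBioNUS/BMSS2 | BMSS/standardfiles_generators/combinegen.py | clean_groupvariables
-- ===== SOURCE A (Python) =====
-- def clean_groupvariables(Plot_Variable, tspan, task_total, variabletask_list):
--     '''
--     Groups variables pertaining to the same plot figure together
--     :param Plot_Variable:  Variables to be plotted in list format
--     :param tspan: tspan of model in list of arrays
--     :param task_total: total number of tasks in int format
--     :param variabletask_list: variables in list format
--     :return variable_statement: variables for each plot in list format
--     :return Total_Fig: total number of plots (number of sims * number of variables to plot) in int format
--     '''
--     Total_Fig = len(Plot_Variable) * len(tspan)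
--     variable_statement = ['']*Total_Fig
--     var_stepjump = len(Plot_Variable) * len(tspan)
--     fig_variable = 0
--     for plot_count in range(Total_Fig):
--         while fig_variable < (task_total*len(Plot_Variable)):
--             if (fig_variable+var_stepjump) < (task_total*len(Plot_Variable)):
--                 variable_statement[plot_count] = variable_statement[plot_count] + variabletask_list[fig_variable] + ', '
--             else:
--                 variable_statement[plot_count] = variable_statement[plot_count] + variabletask_list[fig_variable]
--             fig_variable = fig_variable + var_stepjump
--         fig_variable = plot_count + 1
--
--     return variable_statement, Total_Fig
-- ===== SOURCE B (Python) =====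
-- def clean_groupvariables(Plot_Variable, tspan, task_total, variabletask_list):
--     Total_Fig = len(Plot_Variable) * len(tspan)
--     if Total_Fig == 0:
--         return [], Total_Fig
--     buckets = [[] for _ in range(Total_Fig)]
--     for idx in range(task_total * len(Plot_Variable)):
--         buckets[idx % Total_Fig].append(variabletask_list[idx])
--     return [', '.join(b) for b in buckets], Total_Fig
-- ===== Notes on version B (the rewrite author's own statement) =====
-- stated objective: simpler
-- what changed: Replaces A's per-figure strided while-loop with manual stride/reset bookkeeping and repeated string concatenation by a single element-major pass that scatters each item into bucket idx % Total_Fig, then joins each bucket once with ', '.join.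
import Mathlib
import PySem

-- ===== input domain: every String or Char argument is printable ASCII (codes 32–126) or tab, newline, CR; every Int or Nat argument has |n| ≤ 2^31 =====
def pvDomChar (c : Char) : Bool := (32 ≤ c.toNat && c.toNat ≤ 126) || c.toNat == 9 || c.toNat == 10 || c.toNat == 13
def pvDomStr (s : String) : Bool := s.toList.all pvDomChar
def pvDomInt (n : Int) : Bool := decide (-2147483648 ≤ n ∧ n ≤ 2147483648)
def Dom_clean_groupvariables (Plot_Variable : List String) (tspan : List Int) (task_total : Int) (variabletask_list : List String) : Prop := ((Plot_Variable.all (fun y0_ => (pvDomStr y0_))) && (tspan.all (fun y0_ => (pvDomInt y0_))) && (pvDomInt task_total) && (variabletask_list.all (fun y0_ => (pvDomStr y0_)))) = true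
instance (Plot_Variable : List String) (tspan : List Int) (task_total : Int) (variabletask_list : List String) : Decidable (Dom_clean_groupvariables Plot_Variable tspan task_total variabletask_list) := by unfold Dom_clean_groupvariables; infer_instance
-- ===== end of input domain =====

-- B replaces A's per-figure strided while-loop (building each string by repeated
-- concatenation) with one element-major pass scattering items into index-mod buckets
-- that are then joined; equivalence of return values is proved on Pre_ (where A
-- raises no IndexError).

-- ===== PORT A =====
-- the Python 'while fig_variable < task_total*len(Plot_Variable)' loop; the extra
-- '0 < step' guard is a totality guard only: in A step = Total_Fig ≥ 1 whenever
-- the for-body (and hence this while) runs.  vtl[fig] is pyGet? with default ""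
-- — exact on Pre_, where every accessed index is in range.
def aWhile (limit step : Int) (vtl : List String) (fig : Int) (acc : String) : Int × String :=
  if _h : fig < limit ∧ 0 < step then
    let item := (PySem.List.pyGet? vtl fig).getD ""
    let acc' := if fig + step < limit then acc ++ item ++ ", " else acc ++ item
    aWhile limit step vtl (fig + step) acc'
  else (fig, acc)
termination_by (limit - fig).toNat
decreasing_by omega

def clean_groupvariables (Plot_Variable : List String) (tspan : List Int) (task_total : Int) (variabletask_list : List String) : List String × Int :=
  let Total_Fig : Int := (Plot_Variable.length : Int) * (tspan.length : Int)
  let variable_statement : List String := List.replicate Total_Fig.toNat ""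
  let var_stepjump : Int := Total_Fig
  let limit : Int := task_total * (Plot_Variable.length : Int)
  let st := (List.range Total_Fig.toNat).foldl
    (fun (st : List String × Int) plot_count =>
      let r := aWhile limit var_stepjump variabletask_list st.2 (st.1.getD plot_count "")
      (st.1.set plot_count r.2, (plot_count : Int) + 1))
    (variable_statement, 0)
  (st.1, Total_Fig)

-- ===== PORT B =====
def clean_groupvariables_alt (Plot_Variable : List String) (tspan : List Int) (task_total : Int) (variabletask_list : List String) : List String × Int :=
  let Total_Fig : Int := (Plot_Variable.length : Int) * (tspan.length : Int)
  if Total_Fig = 0 then ([], Total_Fig)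
  else
    -- buckets[idx % Total_Fig].append(variabletask_list[idx])  (list.append = set with ++ [·])
    let buckets := (PySem.List.pyRange 0 (task_total * (Plot_Variable.length : Int)) 1).foldl
      (fun (bks : List (List String)) idx =>
        let p := (PySem.Int.mod idx Total_Fig).toNat
        bks.set p (bks.getD p [] ++ [(PySem.List.pyGet? variabletask_list idx).getD ""]))
      (List.replicate Total_Fig.toNat [])
    (buckets.map (fun b => PySem.Str.join ", " b), Total_Fig)

-- ===== PRECONDITION & SPEC =====
-- Exactly the inputs on which Python A returns: otherwise (some needed index
-- ≥ len(variabletask_list)) A raises IndexError.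
def Pre_clean_groupvariables (Plot_Variable : List String) (tspan : List Int) (task_total : Int) (variabletask_list : List String) : Prop :=
  (Plot_Variable.length : Int) * (tspan.length : Int) = 0 ∨
  task_total * (Plot_Variable.length : Int) ≤ (variabletask_list.length : Int)
instance (Plot_Variable : List String) (tspan : List Int) (task_total : Int) (variabletask_list : List String) : Decidable (Pre_clean_groupvariables Plot_Variable tspan task_total variabletask_list) := by unfold Pre_clean_groupvariables; infer_instance

def pvWitness_clean_groupvariables : List String × List Int × Int × List String :=
  (["OD"], [0], 1, ["x1"])

def Spec_clean_groupvariables (Plot_Variable : List String) (tspan : List Int) (task_total : Int) (variabletask_list : List String) (out : List String × Int) : Prop := out = clean_groupvariables_alt Plot_Variable tspan task_total variabletask_list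
instance (Plot_Variable : List String) (tspan : List Int) (task_total : Int) (variabletask_list : List String) (out : List String × Int) : Decidable (Spec_clean_groupvariables Plot_Variable tspan task_total variabletask_list out) := by unfold Spec_clean_groupvariables; infer_instance

-- ===== CLAIM (what is proved, stated in full; the proofs are below) =====
def Claim_equal_clean_groupvariables : Prop := ∀ (Plot_Variable : List String) (tspan : List Int) (task_total : Int) (variabletask_list : List String), Dom_clean_groupvariables Plot_Variable tspan task_total variabletask_list → Pre_clean_groupvariables Plot_Variable tspan task_total variabletask_list → Spec_clean_groupvariables Plot_Variable tspan task_total variabletask_list (clean_groupvariables Plot_Variable tspan task_total variabletask_list)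

-- ===== LEMMAS AND PROOFS =====

-- the list of items A's fig-th strided walk (and B's fig-th bucket) collects
def prog (limit step : Int) (vtl : List String) (i : Int) : List String :=
  if _h : i < limit ∧ 0 < step then
    (PySem.List.pyGet? vtl i).getD "" :: prog limit step vtl (i + step)
  else []
termination_by (limit - i).toNat
decreasing_by omega

theorem join_nil (sep : String) : PySem.Str.join sep [] = "" := by
  simp [PySem.Str.join, PySem.Chars.join, List.intercalate]

theorem join_singleton (sep : String) (x : String) : PySem.Str.join sep [x] = x := by
  simp [PySem.Str.join, PySem.Chars.join, List.intercalate]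

theorem join_cons (sep x : String) (rest : List String) (h : rest ≠ []) :
    PySem.Str.join sep (x :: rest) = x ++ sep ++ PySem.Str.join sep rest := by
  obtain ⟨y, ys, rfl⟩ := List.exists_cons_of_ne_nil h
  simp [PySem.Str.join, PySem.Chars.join, List.intercalate, String.ofList_append,
    String.append_assoc]

theorem prog_ne_nil (limit step : Int) (vtl : List String) (i : Int)
    (h : i < limit ∧ 0 < step) : prog limit step vtl i ≠ [] := by
  rw [prog]; simp [h]

theorem prog_nil (limit step : Int) (vtl : List String) (i : Int)
    (h : ¬ (i < limit ∧ 0 < step)) : prog limit step vtl i = [] := by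
  rw [prog]; simp [h]

theorem aWhile_snd (limit step : Int) (vtl : List String) :
    ∀ (i : Int) (acc : String),
      (aWhile limit step vtl i acc).2 = acc ++ PySem.Str.join ", " (prog limit step vtl i) := by
  intro i acc
  fun_induction aWhile limit step vtl i acc with
  | case1 i acc h item acc' ih =>
    rw [prog, dif_pos h]
    rw [ih]
    by_cases h2 : i + step < limit
    · have hne := prog_ne_nil limit step vtl (i + step) ⟨h2, h.2⟩
      rw [join_cons _ _ _ hne]
      simp [acc', item, h2, String.append_assoc]
    · have hnil := prog_nil limit step vtl (i + step) (by intro hc; exact h2 hc.1)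
      rw [hnil, join_singleton, join_nil]
      simp [acc', item, h2]
  | case2 i acc h =>
    rw [prog_nil limit step vtl i h, join_nil]
    simp

-- characterisation of A's fold: after n steps the list is the map of the
-- per-figure while-results over range n, and the fig counter is n
theorem afold_char (limit step : Int) (vtl : List String) (N : Nat) :
    ∀ n, n ≤ N →
      (List.range n).foldl
        (fun (st : List String × Int) plot_count =>
          let r := aWhile limit step vtl st.2 (st.1.getD plot_count "")
          (st.1.set plot_count r.2, (plot_count : Int) + 1))
        (List.replicate N "", 0)
      = ((List.range n).map (fun (p : Nat) => (aWhile limit step vtl (p : Int) "").2)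
          ++ List.replicate (N - n) "", (n : Int)) := by
  intro n
  induction n with
  | zero => simp
  | succ n ih =>
    intro hn
    rw [List.range_succ, List.foldl_append, ih (by omega)]
    simp only [List.foldl_cons, List.foldl_nil]
    have hlen : ((List.range n).map (fun (p : Nat) => (aWhile limit step vtl (p : Int) "").2)).length = n := by
      simp
    have hgetD : (((List.range n).map (fun (p : Nat) => (aWhile limit step vtl (p : Int) "").2))
        ++ List.replicate (N - n) "").getD n "" = "" := by
      rw [List.getD_append_right _ _ _ _ (by omega)]
      rw [hlen]
      simp only [Nat.sub_self]
      cases h : N - n with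
      | zero => omega
      | succ k => simp [List.replicate_succ]
    rw [hgetD]
    simp only [Prod.mk.injEq]
    refine ⟨?_, ?_⟩
    · rw [List.set_append_right _ _ (by omega), hlen, Nat.sub_self]
      have hrep : List.replicate (N - n) "" = "" :: List.replicate (N - (n+1)) "" := by
        have : N - n = (N - (n+1)) + 1 := by omega
        rw [this, List.replicate_succ]
      rw [hrep]
      simp [List.append_assoc]
    · push_cast; ring

-- extending the element range by one appends the new element to exactly
-- the bucket whose progression hits m
theorem prog_cons (limit step : Int) (vtl : List String) (i : Int)
    (h : i < limit ∧ 0 < step) :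
    prog limit step vtl i = (PySem.List.pyGet? vtl i).getD "" :: prog limit step vtl (i + step) := by
  rw [prog, dif_pos h]

theorem prog_succ (step : Int) (vtl : List String) (m : Int) (hs : 0 < step) :
    ∀ i : Int, 0 ≤ i →
      prog (m + 1) step vtl i =
        prog m step vtl i ++
          (if i ≤ m ∧ (m - i) % step = 0 then [(PySem.List.pyGet? vtl m).getD ""] else []) := by
  intro i hi
  induction hn : (m + 1 - i).toNat using Nat.strong_induction_on generalizing i with
  | _ k ih =>
    rcases lt_trichotomy m i with him | him | him
    · -- i > m : both sides empty
      rw [prog_nil (m+1) step vtl i (by omega), prog_nil m step vtl i (by omega)]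
      simp [show ¬ i ≤ m by omega]
    · -- i = m
      subst him
      rw [prog_cons (m+1) step vtl m ⟨by omega, hs⟩,
          prog_nil (m+1) step vtl (m+step) (by omega),
          prog_nil m step vtl m (by omega)]
      simp
    · -- i < m
      rw [prog_cons (m+1) step vtl i ⟨by omega, hs⟩, prog_cons m step vtl i ⟨him, hs⟩]
      by_cases hstep : i + step ≤ m
      · rw [ih (m + 1 - (i + step)).toNat (by omega) (i + step) (by omega) rfl]
        have hmod : (m - (i + step)) % step = (m - i) % step := by
          rw [show m - (i + step) = (m - i) - step by ring, Int.sub_emod, Int.emod_self,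
              sub_zero, Int.emod_emod_of_dvd _ (dvd_refl step)]
        simp [hstep, hmod, him.le]
      · -- i + step overshoots m: nothing more is collected on either side
        rw [prog_nil (m+1) step vtl (i+step) (by omega), prog_nil m step vtl (i+step) (by omega)]
        have hne : (m - i) % step ≠ 0 := by
          rw [Int.emod_eq_of_lt (by omega) (by omega)]
          omega
        simp [hne]

-- for 0 ≤ q < TF and 0 ≤ k : the bucket condition picks exactly q = k % TF
theorem bucket_cond (TF k q : Int) (hTF : 0 < TF) (hk : 0 ≤ k) (hq : 0 ≤ q) (hqTF : q < TF) :
    (q ≤ k ∧ (k - q) % TF = 0) ↔ q = k % TF := by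
  have hdm := Int.mul_ediv_add_emod k TF
  have h0 : 0 ≤ k % TF := Int.emod_nonneg k (by omega)
  have h1 : k % TF < TF := Int.emod_lt_of_pos k hTF
  have hd0 : 0 ≤ k / TF := Int.ediv_nonneg hk (by omega)
  constructor
  · rintro ⟨hle, hmod⟩
    rcases Int.dvd_of_emod_eq_zero hmod with ⟨t, ht⟩
    have hk' : k = q + TF * t := by rw [← ht]; ring
    rw [hk', Int.add_mul_emod_self_left, Int.emod_eq_of_lt hq hqTF]
  · rintro rfl
    refine ⟨by nlinarith [mul_nonneg (le_of_lt hTF) hd0], ?_⟩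
    have : k - k % TF = TF * (k / TF) := by omega
    rw [this, Int.mul_emod_right]

-- characterisation of B's scatter fold over range(k)
theorem bfold_char (TF : Int) (vtl : List String) (N : Nat) (hTF : 0 < TF)
    (hN : (N : Int) = TF) :
    ∀ k : Nat,
      (PySem.List.pyRange 0 (k : Int) 1).foldl
        (fun (bks : List (List String)) idx =>
          let p := (PySem.Int.mod idx TF).toNat
          bks.set p (bks.getD p [] ++ [(PySem.List.pyGet? vtl idx).getD ""]))
        (List.replicate N [])
      = (List.range N).map (fun (p : Nat) => prog (k : Int) TF vtl (p : Int)) := by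
  intro k
  induction k with
  | zero =>
    rw [PySem.List.pyRange_one_eq_nil (by omega)]
    simp only [List.foldl_nil]
    apply List.ext_getElem (by simp)
    intro i h1 h2
    simp only [List.getElem_replicate, List.getElem_map, List.getElem_range, Nat.cast_zero]
    rw [prog_nil 0 TF vtl i (by omega)]
  | succ k ih =>
    have hsplit : PySem.List.pyRange 0 ((k:Int) + 1) 1
        = PySem.List.pyRange 0 (k : Int) 1 ++ [(k : Int)] := by
      exact PySem.List.pyRange_one_succ_right (by omega)
    push_cast
    rw [hsplit, List.foldl_append, ih]
    simp only [List.foldl_cons, List.foldl_nil]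
    -- the touched bucket
    have hmodfmod : PySem.Int.mod (k : Int) TF = (k : Int) % TF := by
      rw [PySem.Int.mod]
      exact Int.fmod_eq_emod_of_nonneg _ (by omega)
    have h0 : 0 ≤ (k : Int) % TF := Int.emod_nonneg _ (by omega)
    have h1 : (k : Int) % TF < TF := Int.emod_lt_of_pos _ hTF
    have hpN : ((k : Int) % TF).toNat < N := by omega
    have hgetD : ((List.range N).map (fun (p : Nat) => prog (k : Int) TF vtl (p : Int))).getD
        ((k : Int) % TF).toNat [] = prog (k : Int) TF vtl (((k : Int) % TF).toNat : Int) := by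
      exact PySem.List.getD_map_range _ _ _ _ hpN
    rw [hmodfmod, hgetD]
    apply List.ext_getElem (by simp)
    intro i hi1 hi2
    simp only [List.length_set, List.length_map, List.length_range] at hi1
    by_cases hip : i = ((k : Int) % TF).toNat
    · subst hip
      rw [List.getElem_set_self]
      simp only [List.getElem_map, List.getElem_range]
      have hcond : (((k : Int) % TF).toNat : Int) ≤ (k : Int) ∧
          ((k : Int) - (((k : Int) % TF).toNat : Int)) % TF = 0 := by
        apply (bucket_cond TF (k : Int) _ hTF (by omega) (by omega) (by omega)).mpr
        omega
      rw [prog_succ TF vtl (k : Int) hTF _ (by omega), if_pos hcond]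
    · rw [List.getElem_set_ne (by omega)]
      simp only [List.getElem_map, List.getElem_range]
      have hcond : ¬ (((i : Nat) : Int) ≤ (k : Int) ∧ ((k : Int) - (i : Int)) % TF = 0) := by
        intro hc
        have := (bucket_cond TF (k : Int) (i : Int) hTF (by omega) (by omega) (by omega)).mp hc
        omega
      rw [prog_succ TF vtl (k : Int) hTF _ (by omega), if_neg hcond, List.append_nil]

-- prog only depends on max(limit, 0) for nonnegative start
theorem prog_toNat (limit step : Int) (vtl : List String) (i : Int) (hi : 0 ≤ i) :
    prog limit step vtl i = prog ((limit.toNat : Int)) step vtl i := by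
  by_cases h : 0 ≤ limit
  · rw [Int.toNat_of_nonneg h]
  · rw [prog_nil limit step vtl i (by omega), prog_nil _ step vtl i (by omega)]

-- ===== VERDICT (by name: the statement is the Claim_ definition above) =====
theorem clean_groupvariables_spec : Claim_equal_clean_groupvariables := by
  intro PV tspan tt vtl _ _
  show clean_groupvariables PV tspan tt vtl = clean_groupvariables_alt PV tspan tt vtl
  unfold clean_groupvariables clean_groupvariables_alt
  set TF : Int := (PV.length : Int) * (tspan.length : Int) with hTFdef
  have hTF0 : 0 ≤ TF := by positivity
  by_cases hz : TF = 0
  · simp only [hz]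
    simp
  · have hTFpos : 0 < TF := lt_of_le_of_ne hTF0 (Ne.symm hz)
    simp only [if_neg hz]
    set limit : Int := tt * (PV.length : Int) with hlim
    set N : Nat := TF.toNat with hN
    have hNTF : (N : Int) = TF := by omega
    refine Prod.ext ?_ rfl
    simp only
    -- A side
    rw [afold_char limit TF vtl N N le_rfl]
    simp only [Nat.sub_self, List.replicate_zero, List.append_nil]
    -- B side
    have hblim : PySem.List.pyRange 0 limit 1 = PySem.List.pyRange 0 ((limit.toNat : Nat) : Int) 1 := by
      by_cases h : 0 ≤ limit
      · rw [Int.toNat_of_nonneg h]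
      · rw [PySem.List.pyRange_one_eq_nil (by omega),
            PySem.List.pyRange_one_eq_nil (by omega)]
    rw [hblim, bfold_char TF vtl N hTFpos hNTF limit.toNat, List.map_map]
    apply List.ext_getElem (by simp)
    intro i h1 h2
    simp only [List.getElem_map, List.getElem_range, Function.comp]
    rw [aWhile_snd, ← prog_toNat limit TF vtl (i : Int) (by omega)]
    simp
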